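-- pv_equiv track=rewrite | github.com/avan-sh/info6105-psa | A5/s2.py | solution
-- ===== SOURCE A (Python) =====
-- def check_max(operation, max_len, max_brea):
--     rectangle_len = operation[1]
--     rectangle_breadth = operation[2]
--     align1_fit = (max_len<=rectangle_len) & (max_brea<=rectangle_breadth)
--     align2_fit = (max_len<=rectangle_breadth) & (max_brea<=rectangle_len)
--     fit = align1_fit or align2_fit
--     return fit
--
-- def solution(operations):
--     saved_rectangles = []
--     max_len = 0
--     max_bre = 0
--     op = []
--     for operation in operations:
--         if operation[0] == 0:
--             saved_rectangles.append(operation)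
--             saved_len = operation[1]
--             saved_bre = operation[2]
--             max_len, max_bre = max(saved_len, max_len),  max(saved_bre, max_bre)
--         else:
--             all_fit = check_max(operation, max_len, max_bre)
--             # check_all_saved_rectangles_fit(operation, saved_rectangles)
--             op.append(all_fit)
--     return op
-- ===== SOURCE B (Python) =====
-- def solution(operations):
--     saved = []
--     out = []
--     for operation in operations:
--         if operation[0] == 0:
--             saved.append(operation)
--         else:
--             ml = 0
--             mb = 0
--             for r in saved:
--                 ml = max(ml, r[1])
--                 mb = max(mb, r[2])
--             fit = (ml <= operation[1] and mb <= operation[2]) or \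
--                   (ml <= operation[2] and mb <= operation[1])
--             out.append(fit)
--     return out
-- ===== Notes on version B (the rewrite author's own statement) =====
-- stated objective: alternative
-- what changed: B drops A's incrementally maintained running-maxima state and instead rescans the saved rectangles at each query, recomputing both maxima from scratch before the two-orientation fit test.
import Mathlib
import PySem

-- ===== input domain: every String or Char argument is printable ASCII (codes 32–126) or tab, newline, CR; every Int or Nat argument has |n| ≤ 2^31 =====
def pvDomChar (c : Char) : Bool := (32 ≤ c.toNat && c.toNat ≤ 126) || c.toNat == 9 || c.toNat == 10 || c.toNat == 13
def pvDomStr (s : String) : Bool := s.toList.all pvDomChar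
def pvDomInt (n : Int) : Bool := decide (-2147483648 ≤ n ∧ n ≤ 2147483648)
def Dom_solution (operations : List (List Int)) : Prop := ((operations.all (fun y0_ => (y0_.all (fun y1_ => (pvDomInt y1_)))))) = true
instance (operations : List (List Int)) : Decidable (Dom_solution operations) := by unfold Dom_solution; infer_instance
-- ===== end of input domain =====

-- B replaces A's incrementally maintained running maxima by a full rescan of the
-- saved rectangles at each query (alternative decomposition, same results).

-- ===== PORT A =====
def check_max (operation : List Int) (max_len max_brea : Int) : Bool :=
  let rectangle_len := (PySem.List.pyGet? operation 1).getD 0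
  let rectangle_breadth := (PySem.List.pyGet? operation 2).getD 0
  let align1_fit := decide (max_len ≤ rectangle_len) && decide (max_brea ≤ rectangle_breadth)
  let align2_fit := decide (max_len ≤ rectangle_breadth) && decide (max_brea ≤ rectangle_len)
  align1_fit || align2_fit

def solLoop : List (List Int) → List (List Int) → Int → Int → List Bool → List Bool
  | [], _, _, _, op => op
  | operation :: rest, saved_rectangles, max_len, max_bre, op =>
    if (PySem.List.pyGet? operation 0).getD 0 = 0 then
      solLoop rest (saved_rectangles ++ [operation])
        (max ((PySem.List.pyGet? operation 1).getD 0) max_len)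
        (max ((PySem.List.pyGet? operation 2).getD 0) max_bre) op
    else
      solLoop rest saved_rectangles max_len max_bre (op ++ [check_max operation max_len max_bre])

def solution (operations : List (List Int)) : List Bool :=
  solLoop operations [] 0 0 []

-- ===== PORT B =====
-- the inner rescan of B: fold over the saved rectangles computing (ml, mb)
def altMaxes (saved : List (List Int)) : Int × Int :=
  saved.foldl (fun p r =>
    (max p.1 ((PySem.List.pyGet? r 1).getD 0), max p.2 ((PySem.List.pyGet? r 2).getD 0))) (0, 0)

def altLoop : List (List Int) → List (List Int) → List Bool → List Bool
  | [], _, out => out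
  | operation :: rest, saved, out =>
    if (PySem.List.pyGet? operation 0).getD 0 = 0 then
      altLoop rest (saved ++ [operation]) out
    else
      let m := altMaxes saved
      let fit := (decide (m.1 ≤ (PySem.List.pyGet? operation 1).getD 0) &&
                  decide (m.2 ≤ (PySem.List.pyGet? operation 2).getD 0)) ||
                 (decide (m.1 ≤ (PySem.List.pyGet? operation 2).getD 0) &&
                  decide (m.2 ≤ (PySem.List.pyGet? operation 1).getD 0))
      altLoop rest saved (out ++ [fit])

def solution_alt (operations : List (List Int)) : List Bool :=
  altLoop operations [] []

-- ===== PRECONDITION & SPEC =====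
-- Pre_ excludes exactly the inputs on which Python A raises IndexError:
-- every operation must have at least 3 entries (op[0], op[1], op[2] are all read).
def Pre_solution (operations : List (List Int)) : Prop :=
  ∀ op ∈ operations, 3 ≤ op.length
instance (operations : List (List Int)) : Decidable (Pre_solution operations) := by
  unfold Pre_solution; infer_instance

def pvWitness_solution : List (List Int) := [[0, 2, 3], [1, 2, 3], [1, 1, 5]]

def Spec_solution (operations : List (List Int)) (out : List Bool) : Prop := out = solution_alt operations
instance (operations : List (List Int)) (out : List Bool) : Decidable (Spec_solution operations out) := by unfold Spec_solution; infer_instance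

-- ===== CLAIM (what is proved, stated in full; the proofs are below) =====
def Claim_equal_solution : Prop := ∀ (operations : List (List Int)), Dom_solution operations → Pre_solution operations → Spec_solution operations (solution operations)

-- ===== LEMMAS AND PROOFS =====

lemma altMaxes_append (saved : List (List Int)) (r : List Int) :
    altMaxes (saved ++ [r]) =
      (max (altMaxes saved).1 ((PySem.List.pyGet? r 1).getD 0),
       max (altMaxes saved).2 ((PySem.List.pyGet? r 2).getD 0)) := by
  simp [altMaxes, List.foldl_append]

lemma solLoop_eq_altLoop (ops : List (List Int)) :
    ∀ (saved : List (List Int)) (out : List Bool),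
      solLoop ops saved (altMaxes saved).1 (altMaxes saved).2 out = altLoop ops saved out := by
  induction ops with
  | nil => intro saved out; rfl
  | cons operation rest ih =>
    intro saved out
    by_cases h : (PySem.List.pyGet? operation 0).getD 0 = 0
    · simp only [solLoop, altLoop, if_pos h]
      have := ih (saved ++ [operation]) out
      rw [altMaxes_append] at this
      rw [← this]
      congr 1 <;> omega
    · simp only [solLoop, altLoop, if_neg h]
      rw [← ih saved (out ++ [_])]
      rfl

-- ===== VERDICT (by name: the statement is the Claim_ definition above) =====
theorem solution_spec : Claim_equal_solution := by
  intro operations _ _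
  unfold Spec_solution solution solution_alt
  exact solLoop_eq_altLoop operations [] []
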